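-- pv_equiv track=rewrite | github.com/ignajaja/coding-II | practica/practica_while.py | iguales
-- ===== SOURCE A (Python) =====
-- def iguales(num):
--     largo = 0
--     ini = num % 10
--     rep = num
--
--     while rep > 0:
--         largo += 1
--         rep //= 10
--
--     while largo > 1:
--         num //= 10
--         largo -= 1
--
--     if ini == num:
--         return True
--     else:
--         return False
-- ===== SOURCE B (Python) =====
-- def iguales(num):
--     ini = num % 10
--     while num >= 10:
--         num //= 10
--     return num == ini
-- ===== Notes on version B (the rewrite author's own statement) =====
-- stated objective: simpler
-- what changed: Replaces A's two sequential loops (count the digits, then strip count-1 times) with a single reduction loop that divides by 10 until the value is below 10, then compares directly.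
import Mathlib
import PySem

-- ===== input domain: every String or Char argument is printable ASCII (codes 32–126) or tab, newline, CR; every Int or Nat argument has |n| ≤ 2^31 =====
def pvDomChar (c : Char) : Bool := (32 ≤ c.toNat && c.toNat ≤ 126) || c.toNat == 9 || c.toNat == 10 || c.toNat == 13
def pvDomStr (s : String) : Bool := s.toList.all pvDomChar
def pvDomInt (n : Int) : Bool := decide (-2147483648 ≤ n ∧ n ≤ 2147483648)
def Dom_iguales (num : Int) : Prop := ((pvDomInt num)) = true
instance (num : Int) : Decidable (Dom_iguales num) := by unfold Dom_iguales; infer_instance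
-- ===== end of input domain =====

-- B replaces A's two sequential loops (digit count, then strip count-1 times) with one reduction loop; simpler, same result.
-- Loops are ported with a Nat fuel bound (fuel ≥ number of iterations) so the ports are structural and kernel-reducible;
-- the fuel is a totality guard only, the computation is the Python loop step for step.
-- ===== PORT A =====
-- first while loop: while rep > 0: largo += 1; rep //= 10
def iguales_count (fuel : Nat) (rep largo : Int) : Int :=
  match fuel with
  | 0 => largo
  | fuel + 1 =>
    if rep > 0 then iguales_count fuel (PySem.Int.floordiv rep 10) (largo + 1) else largo

-- second while loop: while largo > 1: num //= 10; largo -= 1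
def iguales_strip (fuel : Nat) (num largo : Int) : Int :=
  match fuel with
  | 0 => num
  | fuel + 1 =>
    if largo > 1 then iguales_strip fuel (PySem.Int.floordiv num 10) (largo - 1) else num

def iguales (num : Int) : Bool :=
  let largo : Int := 0
  let ini := PySem.Int.mod num 10
  let rep := num
  let largo := iguales_count rep.toNat rep largo
  let num := iguales_strip largo.toNat num largo
  if ini = num then true else false

-- ===== PORT B =====
-- while num >= 10: num //= 10
def iguales_alt_loop (fuel : Nat) (num : Int) : Int :=
  match fuel with
  | 0 => num
  | fuel + 1 =>
    if num ≥ 10 then iguales_alt_loop fuel (PySem.Int.floordiv num 10) else num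

def iguales_alt (num : Int) : Bool :=
  let ini := PySem.Int.mod num 10
  let num := iguales_alt_loop num.toNat num
  num = ini

-- ===== PRECONDITION & SPEC =====
def Spec_iguales (num : Int) (out : Bool) : Prop := out = iguales_alt num
instance (num : Int) (out : Bool) : Decidable (Spec_iguales num out) := by unfold Spec_iguales; infer_instance

-- ===== CLAIM (what is proved, stated in full; the proofs are below) =====
def Claim_equal_iguales : Prop := ∀ (num : Int), Dom_iguales num → Spec_iguales num (iguales num)

-- ===== LEMMAS AND PROOFS =====
-- fuel-free "ideal" versions of the three loops (proof helpers only)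
def countI (rep largo : Int) : Int :=
  if h : rep > 0 then countI (PySem.Int.floordiv rep 10) (largo + 1) else largo
termination_by rep.toNat
decreasing_by
  have := PySem.Int.floordiv_eq_ediv_of_pos (a := rep) (b := 10) (by omega)
  omega

def stripI (num largo : Int) : Int :=
  if largo > 1 then stripI (PySem.Int.floordiv num 10) (largo - 1) else num
termination_by largo.toNat
decreasing_by omega

def loopI (num : Int) : Int :=
  if _h : num ≥ 10 then loopI (PySem.Int.floordiv num 10) else num
termination_by num.toNat
decreasing_by
  have := PySem.Int.floordiv_eq_ediv_of_pos (a := num) (b := 10) (by omega)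
  omega

-- floordiv-by-10 facts used throughout
theorem fd10_pos_lt {n : Int} (h : n > 0) :
    PySem.Int.floordiv n 10 < n ∧ 0 ≤ PySem.Int.floordiv n 10 := by
  rw [PySem.Int.floordiv_eq_ediv_of_pos (by omega)]; omega

-- with sufficient fuel each fueled loop computes its ideal value
theorem count_fuel (fuel : Nat) (rep largo : Int) (hf : rep.toNat ≤ fuel) :
    iguales_count fuel rep largo = countI rep largo := by
  induction fuel generalizing rep largo with
  | zero =>
    rw [iguales_count, countI, dif_neg (by omega)]
  | succ fuel ih =>
    rw [iguales_count, countI]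
    split_ifs with h
    · exact ih _ _ (by have := fd10_pos_lt h; omega)
    · rfl

theorem strip_fuel (fuel : Nat) (num largo : Int) (hf : largo ≤ (fuel : Int) + 1) :
    iguales_strip fuel num largo = stripI num largo := by
  induction fuel generalizing num largo with
  | zero =>
    rw [iguales_strip, stripI, if_neg (by omega)]
  | succ fuel ih =>
    rw [iguales_strip, stripI]
    split_ifs with h
    · exact ih _ _ (by push_cast at hf ⊢; omega)
    · rfl

theorem loop_fuel (fuel : Nat) (num : Int) (hf : num.toNat ≤ fuel) :
    iguales_alt_loop fuel num = loopI num := by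
  induction fuel generalizing num with
  | zero =>
    rw [iguales_alt_loop, loopI, dif_neg (by omega)]
  | succ fuel ih =>
    rw [iguales_alt_loop, loopI]
    split_ifs with h
    · exact ih _ (by have := fd10_pos_lt (show num > 0 by omega); omega)
    · rfl

-- the accumulator of the count loop is additive
theorem countI_shift (rep largo : Int) :
    countI rep largo = countI rep 0 + largo := by
  by_cases h : rep > 0
  · rw [countI, dif_pos h,
        show countI rep 0 = countI (PySem.Int.floordiv rep 10) 1 from by
          rw [countI, dif_pos h]; norm_num,
        countI_shift (PySem.Int.floordiv rep 10) (largo + 1),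
        countI_shift (PySem.Int.floordiv rep 10) 1]
    ring
  · rw [countI, dif_neg h, countI, dif_neg h]; ring
termination_by rep.toNat
decreasing_by all_goals (have := fd10_pos_lt h; omega)

theorem countI_nonneg (rep : Int) : 0 ≤ countI rep 0 := by
  rw [countI]
  split_ifs with h
  · rw [countI_shift]
    have := countI_nonneg (PySem.Int.floordiv rep 10)
    omega
  · omega
termination_by rep.toNat
decreasing_by have := fd10_pos_lt h; omega

-- key lemma: stripping (digit count - 1) times equals stripping until < 10
theorem stripI_eq_loopI (num : Int) :
    stripI num (countI num 0) = loopI num := by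
  by_cases h : num ≥ 10
  · have hq : 0 < PySem.Int.floordiv num 10 := by
      rw [PySem.Int.floordiv_eq_ediv_of_pos (by omega)]; omega
    have hc : countI num 0 = countI (PySem.Int.floordiv num 10) 0 + 1 := by
      rw [countI, dif_pos (by omega : num > 0), countI_shift]; omega
    have hc1 : 1 ≤ countI (PySem.Int.floordiv num 10) 0 := by
      rw [countI, dif_pos hq, countI_shift]
      have := countI_nonneg (PySem.Int.floordiv (PySem.Int.floordiv num 10) 10)
      omega
    rw [hc, stripI, if_pos (by omega : (countI (PySem.Int.floordiv num 10) 0 + 1) > 1),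
        show countI (PySem.Int.floordiv num 10) 0 + 1 - 1
          = countI (PySem.Int.floordiv num 10) 0 from by ring,
        stripI_eq_loopI (PySem.Int.floordiv num 10)]
    conv_rhs => rw [loopI]
    rw [dif_pos h]
  · rw [loopI, dif_neg h]
    by_cases hp : num > 0
    · have h0 : PySem.Int.floordiv num 10 = 0 := by
        rw [PySem.Int.floordiv_eq_ediv_of_pos (by omega)]; omega
      have hc : countI num 0 = 1 := by
        rw [countI, dif_pos hp, h0, countI, dif_neg (by omega)]; norm_num
      rw [hc, stripI, if_neg (by omega)]
    · have hc : countI num 0 = 0 := by rw [countI, dif_neg hp]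
      rw [hc, stripI, if_neg (by omega)]
termination_by num.toNat
decreasing_by have := fd10_pos_lt (show num > 0 by omega); omega

-- ===== VERDICT (by name: the statement is the Claim_ definition above) =====
theorem iguales_spec : Claim_equal_iguales := by
  intro num _
  unfold Spec_iguales iguales iguales_alt
  simp only []
  rw [count_fuel _ _ _ (le_refl _)]
  rw [strip_fuel _ _ _ (by have := countI_nonneg num; omega)]
  rw [loop_fuel _ _ (le_refl _)]
  rw [stripI_eq_loopI]
  split_ifs with h
  · exact (decide_eq_true (Eq.symm h)).symm
  · exact (decide_eq_false (fun e => h e.symm)).symm
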